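-- pv_equiv track=rewrite | github.com/rustyquill/protocolarg | lambdas/database-results/src/handler.py | get_nonce_from_querystring
-- ===== SOURCE A (Python) =====
-- def get_nonce_from_querystring(querystring: str):
--     """
--     returns the token from the given querystring
--     """
--
--     if not querystring:
--         return None
--
--     for query in querystring.split('&'):
--         if query.startswith(f'nonce='):
--             token = query[len(f'nonce='):]
--             token = token.replace('%3D', '=')
--             return token
--
--     return None
-- ===== SOURCE B (Python) =====
-- def get_nonce_from_querystring(querystring: str):
--     """
--     returns the token from the given querystring
--     """
--     if not querystring:
--         return None
--     s = querystring
--     while True: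
--         if s.startswith('nonce='):
--             rest = s[6:]
--             amp = rest.find('&')
--             value = rest if amp == -1 else rest[:amp]
--             return value.replace('%3D', '=')
--         amp = s.find('&')
--         if amp == -1:
--             return None
--         s = s[amp + 1:]
-- ===== Notes on version B (the rewrite author's own statement) =====
-- stated objective: alternative
-- what changed: Replaces building the full split-on-separator segment list and scanning it with a single in-place forward scan that uses startswith/find to jump from one separator to the next, slicing the value out directly.
import Mathlib
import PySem

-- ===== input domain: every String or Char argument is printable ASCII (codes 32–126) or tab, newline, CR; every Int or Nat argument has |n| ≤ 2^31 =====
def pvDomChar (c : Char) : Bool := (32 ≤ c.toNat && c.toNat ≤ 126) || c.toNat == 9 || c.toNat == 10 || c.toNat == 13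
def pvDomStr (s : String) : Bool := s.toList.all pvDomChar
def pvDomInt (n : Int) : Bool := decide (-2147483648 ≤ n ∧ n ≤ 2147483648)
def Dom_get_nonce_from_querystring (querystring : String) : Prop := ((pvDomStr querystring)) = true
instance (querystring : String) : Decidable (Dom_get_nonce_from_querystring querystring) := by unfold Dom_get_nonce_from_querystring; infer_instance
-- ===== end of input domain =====

-- B replaces A's split-then-scan-segments loop by a single in-place forward scan that
-- jumps from one separator to the next with find and slices the value out directly
-- (alternative, same cost; no segment list is built).

-- ===== PORT A =====
-- the loop 'for query in querystring.split('&'): …'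
def pvLoopA : List (List Char) → Option (List Char)
  | [] => none
  | q :: rest =>
    if PySem.Chars.startswith q ("nonce=".toList) then
      -- token = query[len('nonce='):]; token = token.replace('%3D', '='); return token
      some (PySem.Chars.replace (PySem.Chars.slice q (some 6) none) ("%3D".toList) ("=".toList))
    else pvLoopA rest

def get_nonce_from_querystring (querystring : String) : Option String :=
  if querystring = "" then none
  else
    match PySem.Chars.split? querystring.toList ("&".toList) with
    | none => none   -- unreachable: the separator '&' is nonempty
    | some segs => (pvLoopA segs).map String.ofList

-- ===== PORT B =====
-- s.find('&') characterised (needed for the termination of pvScanB's while-loop recursion)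
lemma pvGoAmp (l : List Char) : ∀ k : Nat, PySem.Chars.find.go ['&'] l k =
    if '&' ∈ l then ((k : Int) + ((l.takeWhile (· ≠ '&')).length : Int)) else -1 := by
  induction l with
  | nil => intro k; simp [PySem.Chars.find.go]
  | cons c t ih =>
    intro k
    rw [PySem.Chars.find.go]
    by_cases hc : c = '&'
    · subst hc; simp [List.isPrefixOf]
    · simp [List.isPrefixOf, hc, ih (k + 1), Ne.symm hc]
      split_ifs
      · omega
      · rfl

lemma pvFindAmp (l : List Char) : PySem.Chars.find l ['&'] =
    if '&' ∈ l then (((l.takeWhile (· ≠ '&')).length : Nat) : Int) else -1 := by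
  rw [PySem.Chars.find, pvGoAmp]
  split_ifs <;> simp

-- the 'while True:' loop of Source B, as recursion on the shrinking string s
def pvScanB (s : List Char) : Option (List Char) :=
  if PySem.Chars.startswith s ("nonce=".toList) then
    let rest := PySem.Chars.slice s (some 6) none            -- rest = s[6:]
    let amp := PySem.Chars.find rest ['&']                   -- amp = rest.find('&')
    let value := if amp = -1 then rest else PySem.Chars.slice rest none (some amp)
    some (PySem.Chars.replace value ("%3D".toList) ("=".toList))
  else
    if _h : PySem.Chars.find s ['&'] = -1 then none          -- amp = s.find('&')
    else pvScanB (PySem.Chars.slice s (some (PySem.Chars.find s ['&'] + 1)) none)  -- s = s[amp+1:]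
termination_by s.length
decreasing_by
  rw [pvFindAmp] at _h ⊢
  by_cases hm : '&' ∈ s
  · simp only [hm, if_pos] at _h ⊢
    rw [PySem.Chars.slice_eq_listSlice, PySem.List.slice_from s (by omega)]
    have hne : s ≠ [] := by rintro rfl; simp at hm
    have : 0 < s.length := List.length_pos_iff.mpr hne
    simp [List.length_drop]
    omega
  · simp [hm] at _h

def get_nonce_from_querystring_alt (querystring : String) : Option String :=
  if querystring = "" then none
  else (pvScanB querystring.toList).map String.ofList

-- ===== PRECONDITION & SPEC =====
def Spec_get_nonce_from_querystring (querystring : String) (out : Option String) : Prop := out = get_nonce_from_querystring_alt querystring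
instance (querystring : String) (out : Option String) : Decidable (Spec_get_nonce_from_querystring querystring out) := by unfold Spec_get_nonce_from_querystring; infer_instance

-- ===== CLAIM (what is proved, stated in full; the proofs are below) =====
def Claim_equal_get_nonce_from_querystring : Prop := ∀ (querystring : String), Dom_get_nonce_from_querystring querystring → Spec_get_nonce_from_querystring querystring (get_nonce_from_querystring querystring)

-- ===== LEMMAS AND PROOFS =====

-- reference shape of Python's s.split('&') on char lists
def pvSegs : List Char → List (List Char)
  | [] => [[]]
  | c :: t => if c = '&' then [] :: pvSegs t else (pvSegs t).modifyHead (c :: ·)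

lemma pvSegs_ne_nil (l : List Char) : pvSegs l ≠ [] := by
  induction l with
  | nil => simp [pvSegs]
  | cons c t ih =>
    by_cases hc : c = '&' <;> simp [pvSegs, hc]
    intro h
    exact ih (by simpa using congrArg List.length h)

lemma pvSplitOn_go (fuel : Nat) : ∀ (l cur : List Char) (acc : List (List Char)),
    l.length ≤ fuel →
    PySem.Chars.splitOn.go ['&'] fuel l cur acc =
      acc.reverse ++ (pvSegs l).modifyHead (cur.reverse ++ ·) := by
  induction fuel with
  | zero =>
    intro l cur acc h
    have : l = [] := List.length_eq_zero_iff.mp (Nat.le_zero.mp h)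
    subst this
    simp [PySem.Chars.splitOn.go, pvSegs]
  | succ n ih =>
    intro l cur acc h
    match l with
    | [] => simp [PySem.Chars.splitOn.go, pvSegs]
    | c :: t =>
      rw [PySem.Chars.splitOn.go]
      by_cases hc : c = '&'
      · subst hc
        rw [if_pos (by simp)]
        rw [show List.drop ['&'].length ('&'::t) = t from rfl]
        rw [ih t [] _ (by simpa using h)]
        rcases hs : pvSegs t with _ | ⟨s0, srest⟩
        · exact absurd hs (pvSegs_ne_nil t)
        · simp [pvSegs, hs]
      · rw [if_neg (by simp [List.isPrefixOf_iff_prefix, List.cons_prefix_cons]; intro h; exact absurd h.symm hc)]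
        rw [ih t (c :: cur) acc (by simpa using h)]
        rcases hs : pvSegs t with _ | ⟨s0, srest⟩
        · exact absurd hs (pvSegs_ne_nil t)
        · simp [pvSegs, hc, hs]

lemma pvSplitOn_eq_segs (l : List Char) : PySem.Chars.splitOn l ['&'] = pvSegs l := by
  rw [PySem.Chars.splitOn, pvSplitOn_go (l.length + 1) l [] [] (by omega)]
  rcases hs : pvSegs l with _ | ⟨s0, srest⟩
  · exact absurd hs (pvSegs_ne_nil l)
  · simp

lemma pvSegs_eq (l : List Char) : pvSegs l =
    l.takeWhile (· ≠ '&') ::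
      (if '&' ∈ l then pvSegs ((l.dropWhile (· ≠ '&')).tail) else []) := by
  induction l with
  | nil => simp [pvSegs]
  | cons c t ih =>
    by_cases hc : c = '&'
    · subst hc; simp [pvSegs]
    · rw [pvSegs, if_neg hc, ih]
      simp [Ne.symm hc, hc]

-- 'query.startswith('nonce=')' on the first segment ↔ on the whole remaining string
set_option maxRecDepth 4096 in
lemma pvPrefix_takeWhile (l : List Char) :
    PySem.Chars.startswith (l.takeWhile (· ≠ '&')) ("nonce=".toList) =
      PySem.Chars.startswith l ("nonce=".toList) := by
  by_cases h : "nonce=".toList <+: l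
  · have h2 : "nonce=".toList <+: l.takeWhile (· ≠ '&') := by
      obtain ⟨r, rfl⟩ := h
      rw [List.takeWhile_append_of_pos (by rw [show ("nonce=".toList : List Char) = ['n','o','n','c','e','='] from rfl]; simp)]
      exact List.prefix_append _ _
    rw [Bool.eq_iff_iff]
    simp only [PySem.Chars.startswith, List.isPrefixOf_iff_prefix]
    exact iff_of_true h2 h
  · have h2 : ¬ "nonce=".toList <+: l.takeWhile (· ≠ '&') :=
      fun hp => h (hp.trans (List.takeWhile_prefix _))
    rw [Bool.eq_iff_iff]
    simp only [PySem.Chars.startswith, List.isPrefixOf_iff_prefix]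
    exact iff_of_false h2 h

set_option maxRecDepth 4096 in
lemma pvCore (l : List Char) : pvLoopA (pvSegs l) = pvScanB l := by
  induction l using pvScanB.induct with
  | case1 s hsw =>
    rw [pvScanB, if_pos hsw, pvSegs_eq, pvLoopA]
    rw [if_pos (by rw [pvPrefix_takeWhile]; exact hsw)]
    have hp : "nonce=".toList <+: s := by
      simpa [PySem.Chars.startswith, List.isPrefixOf_iff_prefix] using hsw
    obtain ⟨r, rfl⟩ := hp
    have h6 : ∀ (x : List Char), PySem.Chars.slice ("nonce=".toList ++ x) (some 6) none = x := by
      intro x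
      rw [PySem.Chars.slice_eq_listSlice, PySem.List.slice_from _ (by omega)]
      rw [show ((6:Int)).toNat = ("nonce=".toList).length from rfl, List.drop_left]
    congr 1
    congr 1
    -- token of A = value of B
    conv_lhs => rw [List.takeWhile_append_of_pos (by rw [show ("nonce=".toList : List Char) = ['n','o','n','c','e','='] from rfl]; simp)]
    rw [h6, h6, pvFindAmp]
    by_cases hm : '&' ∈ r
    · rw [if_pos hm, if_neg (by omega)]
      rw [PySem.Chars.slice_eq_listSlice, PySem.List.slice_to r (by omega)]
      rw [show (((r.takeWhile (· ≠ '&')).length : Int)).toNat = (r.takeWhile (· ≠ '&')).length from by omega]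
      calc r.takeWhile (· ≠ '&')
          = List.take ((r.takeWhile (· ≠ '&')).length) (r.takeWhile (· ≠ '&') ++ r.dropWhile (· ≠ '&')) :=
            (List.take_left).symm
        _ = List.take ((r.takeWhile (· ≠ '&')).length) r := by rw [List.takeWhile_append_dropWhile]
    · rw [if_neg hm, if_pos rfl]
      exact List.takeWhile_eq_self_iff.mpr
        (by intro c hcm; simp only [ne_eq, decide_eq_true_eq]; intro hceq; exact hm (hceq ▸ hcm))
  | case2 s hsw hf =>
    rw [pvScanB, if_neg hsw, dif_pos hf, pvSegs_eq, pvLoopA]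
    rw [if_neg (by rw [pvPrefix_takeWhile]; exact hsw)]
    rw [pvFindAmp] at hf
    have hm : '&' ∉ s := by intro hm; rw [if_pos hm] at hf; omega
    rw [if_neg hm]
    rfl
  | case3 s hsw hf ih =>
    rw [pvScanB, if_neg hsw, dif_neg hf, pvSegs_eq, pvLoopA]
    rw [if_neg (by rw [pvPrefix_takeWhile]; exact hsw)]
    have hm : '&' ∈ s := by
      by_contra hm; rw [pvFindAmp, if_neg hm] at hf; exact hf rfl
    have hslice : PySem.Chars.slice s (some (PySem.Chars.find s ['&'] + 1)) none
        = (s.dropWhile (· ≠ '&')).tail := by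
      rw [pvFindAmp, if_pos hm, PySem.Chars.slice_eq_listSlice, PySem.List.slice_from s (by omega)]
      rw [show (((s.takeWhile (· ≠ '&')).length : Int) + 1).toNat = (s.takeWhile (· ≠ '&')).length + 1 from by omega]
      calc List.drop ((s.takeWhile (· ≠ '&')).length + 1) s
          = List.drop ((s.takeWhile (· ≠ '&')).length + 1) (s.takeWhile (· ≠ '&') ++ s.dropWhile (· ≠ '&')) := by
            rw [List.takeWhile_append_dropWhile]
        _ = (s.dropWhile (· ≠ '&')).drop 1 := List.drop_length_add_append 1
        _ = (s.dropWhile (· ≠ '&')).tail := List.drop_one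
    rw [if_pos hm, ← hslice]
    exact ih

-- ===== VERDICT (by name: the statement is the Claim_ definition above) =====
theorem get_nonce_from_querystring_spec : Claim_equal_get_nonce_from_querystring := by
  intro qs _
  unfold Spec_get_nonce_from_querystring
  unfold get_nonce_from_querystring get_nonce_from_querystring_alt
  by_cases hq : qs = ""
  · simp [hq]
  · simp only [hq, ite_false]
    rw [show ("&".toList : List Char) = ['&'] from rfl, PySem.Chars.split?]
    rw [if_neg (by simp)]
    rw [pvSplitOn_eq_segs]
    show Option.map String.ofList (pvLoopA (pvSegs qs.toList)) = Option.map String.ofList (pvScanB qs.toList)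
    rw [pvCore]
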